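-- pv_equiv track=rewrite | github.com/BoudewijnKlijn/competitive_programming | leetcode/leetcode_1981.py | minimizeTheDifference
-- ===== SOURCE A (Python) =====
-- from typing import List
--
-- def minimizeTheDifference(mat: List[List[int]], target: int) -> int:
--     """First determine minimum and maximum path and subtract minimum within rows.
--     If target outside minimum and maximum, min or max is optimum.
--         Otherwise determine optimal path.
--     Subtract all possibilities from remainder and compare with current best ans.
--     Remove negative numbers after checking, those will not improve further."""
--     R = len(mat)
--     min_result = 0
--     max_result = 0
--     for row in range(R):
--         minimum = min(mat[row])
--         maximum = max(mat[row])
--         min_result += minimum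
--         max_result += maximum
--         mat[row] = [num - minimum for num in mat[row]]
--
--     remainder = target - min_result
--     diff_max_min = max_result - min_result
--     # outside bounds if minimum or maximum?
--     if remainder <= 0:
--         # impossible to reduce total. minimum is optimum
--         return abs(remainder)
--     elif remainder >= diff_max_min:
--         # impossible to increase total. maximum is optimum
--         return remainder - diff_max_min
--
--     ans = min(abs(remainder), abs(remainder - diff_max_min))
--
--     # if not outside bounds then determine optimal path for remainder
--     # everything added that is less than remainder, reduces remainder (=improvement).
--     # can always choose zero if remainder is overshot.
--     # the optimum depends on values in all rows. greedy is not optimal.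
--     # since the maximum number of column is 70, and the numbers are within 1-70, the
--     #   the total after some rows will likely be duplicated. useful to reduce states.
--     remainders = set([remainder])
--     for row in mat:
--         remainders = {rem - x for x in row for rem in remainders}
--         ans = min(ans, min(map(abs, remainders)))
--         if ans == 0:
--             # early stopping
--             return ans
--         # remove negative numbers, those will never improve further
--         remainders = {rem for rem in remainders if rem > 0}
--
--     return ans
-- ===== SOURCE B (Python) =====
-- from typing import List
--
-- def minimizeTheDifference(mat: List[List[int]], target: int) -> int:
--     """Normalize rows by their minima (mutating mat like the original), then
--     depth-first branch-and-bound with memoization instead of A's iterative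
--     per-row set of remainder states: best(i, t) is the best final
--     |remainder - total| reachable from row i with offset sum t so far; a branch
--     is cut off as soon as t >= remainder (offsets are nonnegative, so the total
--     can only grow) and a row's scan stops early once a perfect 0 is found."""
--     R = len(mat)
--     min_result = 0
--     for i in range(R):
--         minimum = min(mat[i])
--         min_result += minimum
--         mat[i] = [num - minimum for num in mat[i]]
--     remainder = target - min_result
--
--     choices = [sorted(set(row), reverse=True) for row in mat]
--     memo = {}
--
--     def best(i, t):
--         if t >= remainder:
--             return t - remainder
--         if i == R:
--             return remainder - t
--         key = (i, t)
--         b = memo.get(key)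
--         if b is None:
--             for x in choices[i]:
--                 v = best(i + 1, t + x)
--                 if b is None or v < b:
--                     b = v
--                     if b == 0:
--                         break
--             memo[key] = b
--         return b
--
--     return best(0, 0)
-- ===== Notes on version B (the rewrite author's own statement) =====
-- stated objective: faster
-- what changed: A evolves a per-row SET of remainder states breadth-first with a running best, positivity pruning and bound shortcuts; B instead runs a top-down depth-first branch-and-bound recursion over rows, memoized by (row index, offset sum), cutting a branch as soon as the accumulated offset reaches the remainder and stopping a row's scan at an exact hit, visiting each row's distinct offsets in descending order.
import Mathlib
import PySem

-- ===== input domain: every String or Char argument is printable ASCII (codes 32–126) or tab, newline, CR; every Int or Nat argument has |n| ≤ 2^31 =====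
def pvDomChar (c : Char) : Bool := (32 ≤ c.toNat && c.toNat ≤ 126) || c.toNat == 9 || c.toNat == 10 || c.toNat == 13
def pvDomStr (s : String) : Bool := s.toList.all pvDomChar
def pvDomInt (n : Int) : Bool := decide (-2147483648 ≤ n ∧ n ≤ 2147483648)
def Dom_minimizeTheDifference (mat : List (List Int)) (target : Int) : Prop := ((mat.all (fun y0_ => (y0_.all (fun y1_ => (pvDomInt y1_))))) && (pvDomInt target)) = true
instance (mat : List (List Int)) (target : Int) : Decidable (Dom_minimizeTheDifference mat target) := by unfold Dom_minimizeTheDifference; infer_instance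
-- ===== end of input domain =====

-- B replaces A's breadth-first evolution of a pruned remainder-state set (with a running best,
-- bound shortcuts and an early stop) by a top-down depth-first branch-and-bound recursion over
-- rows, memoized by (row index, offset sum); a timing run measured it faster on its inputs.
-- Both Pythons mutate `mat` the same way (row minima subtracted) — the equivalence proved here
-- is about the return value.

-- ===== PORT A =====
def pvPrep (mat : List (List Int)) : Int × Int × List (List Int) :=
  mat.foldl (fun acc row =>
    let minimum := (PySem.List.min? row (fun x => x)).getD 0   -- min(mat[row]); ValueError on [] is excluded by Pre_
    let maximum := (PySem.List.max? row (fun x => x)).getD 0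
    (acc.1 + minimum, acc.2.1 + maximum,
      acc.2.2 ++ [row.map (fun num => num - minimum)])) (0, 0, [])

-- {rem - x for x in row for rem in remainders}
def aStep (remainders : PySem.Set Int) (row : List Int) : PySem.Set Int :=
  PySem.Set.ofList (row.flatMap (fun x => remainders.map (fun rem => rem - x)))

-- min(map(abs, s)); on an empty set Python raises ValueError (unreachable under Pre_), getD 0 is junk there
def pvMinAbs (s : List Int) : Int :=
  (PySem.List.min? (s.map (fun rem => |rem|)) (fun x => x)).getD 0

def aLoop (ans : Int) (remainders : PySem.Set Int) : List (List Int) → Int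
  | [] => ans
  | row :: rest =>
    let rs := aStep remainders row
    let ans' := min ans (pvMinAbs rs)
    if ans' = 0 then ans'
    else aLoop ans' (PySem.Set.ofList (rs.filter (fun rem => decide (0 < rem)))) rest

def minimizeTheDifference (mat : List (List Int)) (target : Int) : Int :=
  let p := pvPrep mat
  let remainder := target - p.1
  let diff_max_min := p.2.1 - p.1
  if remainder ≤ 0 then |remainder|
  else if remainder ≥ diff_max_min then remainder - diff_max_min
  else
    let ans := min |remainder| |remainder - diff_max_min|
    aLoop ans (PySem.Set.ofList [remainder]) p.2.2

-- ===== PORT B =====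
-- B's preprocessing loop keeps only the row minima (no maxima); mutation of mat is the same
def bPrep (mat : List (List Int)) : Int × List (List Int) :=
  mat.foldl (fun acc row =>
    let minimum := (PySem.List.min? row (fun x => x)).getD 0
    (acc.1 + minimum, acc.2 ++ [row.map (fun num => num - minimum)])) (0, [])

-- best(i, t) with memo dict, and the inner `for x in choices[i]` scan with its running best `b`
-- (None = not yet set) and its `break` at 0; the remaining rows are carried as the list `cs`
-- (= choices[i:]) alongside the index i that keys the memo.  On an empty row Python would store
-- None in the memo (excluded by Pre_); `.getD 0` is the junk value there.
mutual
def bBest (r : Int) : List (List Int) → Int → Int → PySem.Dict (Int × Int) Int → Int × PySem.Dict (Int × Int) Int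
  | cs, i, t, memo =>
    if r ≤ t then (t - r, memo)
    else
      match cs with
      | [] => (r - t, memo)
      | row :: rest =>
        match PySem.Dict.get? memo (i, t) with
        | some v => (v, memo)
        | none =>
          let p := bScan r rest (i + 1) t row none memo
          let v := p.1.getD 0
          (v, PySem.Dict.insert p.2 (i, t) v)
termination_by cs _ _ _ => (cs.length, 0)

def bScan (r : Int) (rest : List (List Int)) (i t : Int) : List Int → Option Int → PySem.Dict (Int × Int) Int → Option Int × PySem.Dict (Int × Int) Int
  | [], b, memo => (b, memo)
  | x :: xs, b, memo =>
    let q := bBest r rest i (t + x) memo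
    let b' : Option Int := match b with
      | none => some q.1
      | some bv => if q.1 < bv then some q.1 else some bv
    if b' = some 0 then (b', q.2) else bScan r rest i t xs b' q.2
termination_by xs _ _ => (rest.length, xs.length + 1)
end

def minimizeTheDifference_alt (mat : List (List Int)) (target : Int) : Int :=
  let p := bPrep mat
  let remainder := target - p.1
  -- choices = [sorted(set(row), reverse=True) for row in mat]
  let choices := p.2.map (fun row => PySem.List.sorted (PySem.Set.ofList row) (fun x => x) true)
  (bBest remainder choices 0 0 (PySem.Dict.empty)).1

-- ===== PRECONDITION & SPEC =====
-- Pre_ excludes matrices containing an empty row: there Python's min([]) raises ValueError in A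
-- (and B's memo would hold None, a non-int).
def Pre_minimizeTheDifference (mat : List (List Int)) (target : Int) : Prop :=
  ∀ row ∈ mat, row ≠ []
instance (mat : List (List Int)) (target : Int) : Decidable (Pre_minimizeTheDifference mat target) := by
  unfold Pre_minimizeTheDifference; infer_instance
def pvWitness_minimizeTheDifference : List (List Int) × Int := ([[1, 2], [4, 3]], 5)

def Spec_minimizeTheDifference (mat : List (List Int)) (target : Int) (out : Int) : Prop := out = minimizeTheDifference_alt mat target
instance (mat : List (List Int)) (target : Int) (out : Int) : Decidable (Spec_minimizeTheDifference mat target out) := by unfold Spec_minimizeTheDifference; infer_instance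

-- ===== CLAIM (what is proved, stated in full; the proofs are below) =====
def Claim_equal_minimizeTheDifference : Prop := ∀ (mat : List (List Int)) (target : Int), Dom_minimizeTheDifference mat target → Pre_minimizeTheDifference mat target → Spec_minimizeTheDifference mat target (minimizeTheDifference mat target)

-- ===== LEMMAS AND PROOFS =====

-- proof-side model: the UNPRUNED evolution of A's remainder states
def Fr (S : List Int) (rows : List (List Int)) : List Int :=
  rows.foldl (fun S row => aStep S row) S

theorem mem_aStep {S : PySem.Set Int} {row : List Int} {y : Int} :
    y ∈ aStep S row ↔ ∃ x ∈ row, ∃ s ∈ S, y = s - x := by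
  unfold aStep
  simp only [PySem.Set.mem_ofList, List.mem_flatMap, List.mem_map]
  constructor
  · rintro ⟨x, hx, s, hs, rfl⟩; exact ⟨x, hx, s, hs, rfl⟩
  · rintro ⟨x, hx, s, hs, rfl⟩; exact ⟨x, hx, s, hs, rfl⟩

theorem Fr_cons (S : List Int) (row : List Int) (rest : List (List Int)) :
    Fr S (row :: rest) = Fr (aStep S row) rest := rfl

theorem Fr_mono {S T : List Int} (rows : List (List Int)) (h : ∀ y ∈ S, y ∈ T) :
    ∀ y ∈ Fr S rows, y ∈ Fr T rows := by
  induction rows generalizing S T with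
  | nil => exact h
  | cons row rest ih =>
    intro y hy
    rw [Fr_cons] at hy ⊢
    refine ih (fun z hz => ?_) y hy
    rw [mem_aStep] at hz ⊢
    obtain ⟨x, hx, s, hs, rfl⟩ := hz
    exact ⟨x, hx, s, h s hs, rfl⟩

theorem Fr_persist {S : List Int} {rows : List (List Int)} (h0 : ∀ row ∈ rows, (0:Int) ∈ row)
    {s : Int} (hs : s ∈ S) : s ∈ Fr S rows := by
  induction rows generalizing S with
  | nil => exact hs
  | cons row rest ih =>
    rw [Fr_cons]
    refine ih (fun r hr => h0 r (List.mem_cons_of_mem _ hr)) ?_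
    rw [mem_aStep]
    exact ⟨0, h0 row (List.mem_cons_self), s, hs, by ring⟩

theorem Fr_descend {S : List Int} {rows : List (List Int)} (hnn : ∀ row ∈ rows, ∀ x ∈ row, (0:Int) ≤ x) :
    ∀ t ∈ Fr S rows, ∃ s ∈ S, t ≤ s := by
  induction rows generalizing S with
  | nil => exact fun t ht => ⟨t, ht, le_refl t⟩
  | cons row rest ih =>
    intro t ht
    rw [Fr_cons] at ht
    obtain ⟨u, hu, htu⟩ := ih (fun r hr x hx => hnn r (List.mem_cons_of_mem _ hr) x hx) t ht
    rw [mem_aStep] at hu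
    obtain ⟨x, hx, s, hs, rfl⟩ := hu
    have := hnn row (List.mem_cons_self) x hx
    exact ⟨s, hs, by omega⟩

theorem Fr_src {S : List Int} {rows : List (List Int)} {t : Int} (h : t ∈ Fr S rows) :
    ∃ s ∈ S, t ∈ Fr [s] rows := by
  induction rows generalizing S with
  | nil => exact ⟨t, h, List.mem_singleton_self t⟩
  | cons row rest ih =>
    rw [Fr_cons] at h
    obtain ⟨u, hu, htu⟩ := ih h
    rw [mem_aStep] at hu
    obtain ⟨x, hx, s, hs, rfl⟩ := hu
    refine ⟨s, hs, ?_⟩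
    rw [Fr_cons]
    refine Fr_mono rest (fun z hz => ?_) t htu
    rw [List.mem_singleton] at hz
    rw [mem_aStep]
    exact ⟨x, hx, s, List.mem_singleton_self s, hz⟩

theorem Fr_ne_nil {S : List Int} {rows : List (List Int)} (hne : ∀ row ∈ rows, row ≠ [])
    (hS : S ≠ []) : Fr S rows ≠ [] := by
  induction rows generalizing S with
  | nil => exact hS
  | cons row rest ih =>
    rw [Fr_cons]
    refine ih (fun r hr => hne r (List.mem_cons_of_mem _ hr)) ?_
    obtain ⟨s, hs⟩ := List.exists_mem_of_ne_nil S hS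
    obtain ⟨x, hx⟩ := List.exists_mem_of_ne_nil row (hne row (List.mem_cons_self))
    have : s - x ∈ aStep S row := mem_aStep.mpr ⟨x, hx, s, hs, rfl⟩
    exact List.ne_nil_of_mem this

-- generic: (min? l id).getD 0 of a NONEMPTY list is a member and a lower bound
theorem minD_spec {l : List Int} (h : l ≠ []) :
    ((PySem.List.min? l (fun x => x)).getD 0 ∈ l) ∧
      ∀ a ∈ l, (PySem.List.min? l (fun x => x)).getD 0 ≤ a := by
  obtain ⟨m, hm⟩ : ∃ m, PySem.List.min? l (fun x => x) = some m := by
    cases heq : PySem.List.min? l (fun x => x) with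
    | none => exact absurd ((PySem.List.min?_eq_none_iff _ _).mp heq) h
    | some m => exact ⟨m, rfl⟩
  have hmem := PySem.List.min?_mem hm
  have hle := PySem.List.min?_isMin hm
  refine ⟨by simp [hm, hmem], fun a ha => by simpa [hm] using hle a ha⟩

theorem pvMinAbs_spec {s : List Int} (h : s ≠ []) :
    (∃ m ∈ s, pvMinAbs s = |m|) ∧ ∀ m ∈ s, pvMinAbs s ≤ |m| := by
  have hmap : s.map (fun rem => |rem|) ≠ [] := by simpa using h
  obtain ⟨hmem, hle⟩ := minD_spec hmap
  rw [List.mem_map] at hmem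
  obtain ⟨a, ha, hma⟩ := hmem
  exact ⟨⟨a, ha, by rw [pvMinAbs, hma]⟩,
    fun b hb => hle |b| (List.mem_map_of_mem hb)⟩

theorem pvMinAbs_congr {s1 s2 : List Int} (h1 : s1 ≠ []) (h2 : s2 ≠ [])
    (h : ∀ y, y ∈ s1 ↔ y ∈ s2) : pvMinAbs s1 = pvMinAbs s2 := by
  obtain ⟨⟨m1, hm1, he1⟩, hl1⟩ := pvMinAbs_spec h1
  obtain ⟨⟨m2, hm2, he2⟩, hl2⟩ := pvMinAbs_spec h2
  have a1 := hl1 m2 ((h m2).mpr hm2)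
  have a2 := hl2 m1 ((h m1).mp hm1)
  omega

-- the heart of the A side: A's pruned loop with running best = min(best, min-abs of the unpruned evolution)
theorem aLoop_eq (rows : List (List Int)) :
    ∀ (S : PySem.Set Int) (ans : Int),
      (∀ row ∈ rows, row ≠ [] ∧ (0:Int) ∈ row ∧ ∀ x ∈ row, (0:Int) ≤ x) →
      (∃ p ∈ S, (0:Int) < p) → (∀ s ∈ S, ans ≤ |s|) → 0 ≤ ans →
      aLoop ans S rows = min ans (pvMinAbs (Fr S rows)) := by
  induction rows with
  | nil =>
    intro S ans _ hpos hb ha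
    obtain ⟨p, hpS, _⟩ := hpos
    obtain ⟨⟨m, hm, hveq⟩, _⟩ := pvMinAbs_spec (List.ne_nil_of_mem hpS)
    have hansm := hb m hm
    show ans = min ans (pvMinAbs S)
    rw [hveq]
    exact (min_eq_left hansm).symm
  | cons row rest ih =>
    intro S ans hrows hpos hb ha
    obtain ⟨hrne, hr0, hrnn⟩ := hrows row List.mem_cons_self
    have hrows' : ∀ r ∈ rest, r ≠ [] ∧ (0:Int) ∈ r ∧ ∀ x ∈ r, (0:Int) ≤ x :=
      fun r hr => hrows r (List.mem_cons_of_mem _ hr)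
    obtain ⟨p, hpS, hp⟩ := hpos
    set rs := aStep S row with hrs
    have hprs : p ∈ rs := mem_aStep.mpr ⟨0, hr0, p, hpS, by ring⟩
    have hrsne : rs ≠ [] := List.ne_nil_of_mem hprs
    obtain ⟨⟨m, hmrs, hmeq⟩, hmmin⟩ := pvMinAbs_spec hrsne
    set m0 := pvMinAbs rs with hm0
    have hm0nn : (0:Int) ≤ m0 := by rw [hmeq]; exact abs_nonneg m
    have hFrne : Fr rs rest ≠ [] := Fr_ne_nil (fun r hr => (hrows' r hr).1) hrsne
    obtain ⟨⟨t0, ht0, hveq⟩, hvmin⟩ := pvMinAbs_spec hFrne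
    set v := pvMinAbs (Fr rs rest) with hv
    have hv0 : (0:Int) ≤ v := by rw [hveq]; exact abs_nonneg t0
    have hvle_m : v ≤ m0 := by
      rw [hmeq]
      exact hvmin m (Fr_persist (fun r hr => (hrows' r hr).2.1) hmrs)
    show (if min ans m0 = 0 then min ans m0
          else aLoop (min ans m0) (PySem.Set.ofList (rs.filter (fun rem => decide (0 < rem)))) rest)
        = min ans (pvMinAbs (Fr S (row :: rest)))
    rw [show Fr S (row :: rest) = Fr rs rest from rfl, ← hv]
    split_ifs with h0
    · omega
    · set S' : PySem.Set Int := PySem.Set.ofList (rs.filter (fun rem => decide (0 < rem))) with hS'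
      have hmemS' : ∀ z, z ∈ S' ↔ z ∈ rs ∧ 0 < z := by
        intro z
        simp [hS', PySem.Set.mem_ofList, List.mem_filter]
      have hpS' : p ∈ S' := (hmemS' p).mpr ⟨hprs, hp⟩
      have hb' : ∀ s ∈ S', min ans m0 ≤ |s| := fun s hs =>
        le_trans (min_le_right _ _) (hmmin s ((hmemS' s).mp hs).1)
      have hrec := ih S' (min ans m0) hrows' ⟨p, hpS', hp⟩ hb' (le_min ha hm0nn)
      rw [hrec]
      have hS'ne : S' ≠ [] := List.ne_nil_of_mem hpS'
      have hFr'ne : Fr S' rest ≠ [] := Fr_ne_nil (fun r hr => (hrows' r hr).1) hS'ne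
      obtain ⟨⟨t1, ht1, hv'eq⟩, hv'min⟩ := pvMinAbs_spec hFr'ne
      set v' := pvMinAbs (Fr S' rest) with hv'
      have hvv' : v ≤ v' := by
        rw [hv'eq]
        exact hvmin t1 (Fr_mono rest (fun z hz => ((hmemS' z).mp hz).1) t1 ht1)
      have hdich : v' ≤ v ∨ m0 ≤ v := by
        obtain ⟨s, hsrs, ht0s⟩ := Fr_src ht0
        by_cases hspos : 0 < s
        · left
          rw [hveq]
          refine hv'min t0 (Fr_mono rest (fun z hz => ?_) t0 ht0s)
          rw [List.mem_singleton] at hz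
          exact (hmemS' z).mpr ⟨hz ▸ hsrs, hz ▸ hspos⟩
        · right
          obtain ⟨u, hu, htu⟩ := Fr_descend (fun r hr => (hrows' r hr).2.2) t0 ht0s
          rw [List.mem_singleton] at hu
          have hms := hmmin s hsrs
          rw [hveq]
          rw [abs_of_nonpos (by omega : s ≤ 0)] at hms
          have : t0 ≤ s := hu ▸ htu
          have : |t0| = -t0 := abs_of_nonpos (by omega)
          omega
      omega

-- ===== B-side model and lemmas =====

-- pure (memo-free) model of B's recursion
def bPure (r : Int) : List (List Int) → Int → Int
  | [], t => if r ≤ t then t - r else r - t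
  | row :: rest, t =>
    if r ≤ t then t - r
    else (PySem.List.min? (row.map (fun x => bPure r rest (t + x))) (fun y => y)).getD 0

-- the scan's running best as a pure function
def mergeMin (b : Option Int) (v : Int) : Option Int :=
  match b with
  | none => some v
  | some bv => if v < bv then some v else some bv

def scanRes (b : Option Int) : List Int → Option Int
  | [] => b
  | v :: vs => let b' := mergeMin b v; if b' = some 0 then b' else scanRes b' vs

def GoodMemo (r : Int) (rows : List (List Int)) (memo : PySem.Dict (Int × Int) Int) : Prop :=
  ∀ j t v, PySem.Dict.get? memo (j, t) = some v → 0 ≤ j ∧ v = bPure r (rows.drop j.toNat) t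

theorem bPure_cutoff {r t : Int} (h : r ≤ t) (cs : List (List Int)) : bPure r cs t = t - r := by
  cases cs <;> simp [bPure, h]

theorem bPure_nonneg (r : Int) (cs : List (List Int)) : ∀ t, 0 ≤ bPure r cs t := by
  induction cs with
  | nil =>
    intro t
    by_cases h : r ≤ t
    · rw [show bPure r [] t = t - r by simp [bPure, h]]; omega
    · rw [show bPure r [] t = r - t by simp [bPure, h]]; omega
  | cons row rest ih =>
    intro t
    by_cases h : r ≤ t
    · rw [bPure_cutoff h]; omega
    · rw [show bPure r (row :: rest) t
          = (PySem.List.min? (row.map (fun x => bPure r rest (t + x))) (fun y => y)).getD 0 by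
        simp [bPure, h]]
      by_cases hrow : row = []
      · have h0 : PySem.List.min? (([] : List Int).map (fun x => bPure r rest (t + x))) (fun y => y) = none :=
          (PySem.List.min?_eq_none_iff _ _).mpr rfl
        rw [hrow, h0]
        rfl
      · have hne : (row.map (fun x => bPure r rest (t + x))) ≠ [] := by simpa using hrow
        obtain ⟨hmem, _⟩ := minD_spec hne
        rw [List.mem_map] at hmem
        obtain ⟨x, _, hx⟩ := hmem
        rw [← hx]
        exact ih (t + x)

theorem foldl_mergeMin_zero (vs : List Int) (h : ∀ v ∈ vs, 0 ≤ v) :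
    vs.foldl mergeMin (some 0) = some 0 := by
  induction vs with
  | nil => rfl
  | cons v vs ih =>
    have hv := h v (List.mem_cons_self)
    have : mergeMin (some 0) v = some 0 := by
      simp only [mergeMin]
      rw [if_neg (by omega)]
    simp only [List.foldl_cons, this]
    exact ih (fun w hw => h w (List.mem_cons_of_mem _ hw))

theorem scanRes_eq_foldl (vs : List Int) : ∀ b, (∀ v ∈ vs, 0 ≤ v) →
    scanRes b vs = vs.foldl mergeMin b := by
  induction vs with
  | nil => intro b _; rfl
  | cons v vs ih =>
    intro b h
    have hvs : ∀ w ∈ vs, 0 ≤ w := fun w hw => h w (List.mem_cons_of_mem _ hw)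
    show (if mergeMin b v = some 0 then mergeMin b v else scanRes (mergeMin b v) vs)
        = vs.foldl mergeMin (mergeMin b v)
    split_ifs with h0
    · rw [h0, foldl_mergeMin_zero vs hvs]
    · exact ih (mergeMin b v) hvs

theorem foldl_mergeMin_min (vs : List Int) : ∀ v : Int,
    vs.foldl mergeMin (some v) = some (vs.foldl min v) := by
  induction vs with
  | nil => intro v; rfl
  | cons w vs ih =>
    intro v
    have : mergeMin (some v) w = some (min v w) := by
      simp only [mergeMin]
      split_ifs with hw
      · rw [min_eq_right (le_of_lt hw)]
      · rw [min_eq_left (by omega)]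
    simp only [List.foldl_cons, this, ih]

-- the memoized recursion computes the pure model and keeps the memo correct
theorem bBest_eq (r : Int) (rows : List (List Int)) :
    ∀ (cs : List (List Int)) (i t : Int) (memo : PySem.Dict (Int × Int) Int),
      0 ≤ i → cs = rows.drop i.toNat → GoodMemo r rows memo →
      (bBest r cs i t memo).1 = bPure r cs t ∧ GoodMemo r rows (bBest r cs i t memo).2 := by
  intro cs
  induction cs with
  | nil =>
    intro i t memo hi hdrop hg
    by_cases hc : r ≤ t
    · rw [show bBest r [] i t memo = (t - r, memo) by rw [bBest]; simp [hc]]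
      exact ⟨by rw [bPure_cutoff hc], hg⟩
    · rw [show bBest r [] i t memo = (r - t, memo) by rw [bBest]; simp [hc]]
      exact ⟨by simp [bPure, hc], hg⟩
  | cons row rest ih =>
    intro i t memo hi hdrop hg
    by_cases hc : r ≤ t
    · rw [show bBest r (row :: rest) i t memo = (t - r, memo) by rw [bBest]; simp [hc]]
      exact ⟨by rw [bPure_cutoff hc], hg⟩
    · have hrest : rest = rows.drop (i + 1).toNat := by
        have h1 : (i + 1).toNat = i.toNat + 1 := by omega
        rw [h1]
        have h2 : rows.drop (i.toNat + 1) = List.drop 1 (rows.drop i.toNat) := by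
          rw [List.drop_drop]
        rw [h2, ← hdrop]
        rfl
      cases hget : PySem.Dict.get? memo (i, t) with
      | some v =>
        rw [show bBest r (row :: rest) i t memo = (v, memo) by rw [bBest]; simp [hc, hget]]
        obtain ⟨_, hv⟩ := hg i t v hget
        exact ⟨by rw [hv, ← hdrop], hg⟩
      | none =>
        have hscan : ∀ (xs : List Int) (b : Option Int) (memo' : PySem.Dict (Int × Int) Int),
            GoodMemo r rows memo' →
            (bScan r rest (i + 1) t xs b memo').1
              = scanRes b (xs.map (fun x => bPure r rest (t + x)))
            ∧ GoodMemo r rows (bScan r rest (i + 1) t xs b memo').2 := by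
          intro xs
          induction xs with
          | nil =>
            intro b memo' hg'
            have hnil : bScan r rest (i + 1) t [] b memo' = (b, memo') := by
              rw [bScan.eq_def]
            rw [hnil]
            exact ⟨rfl, hg'⟩
          | cons x xs ihx =>
            intro b memo' hg'
            obtain ⟨hq1, hq2⟩ := ih (i + 1) (t + x) memo' (by omega) hrest hg'
            rw [show bScan r rest (i + 1) t (x :: xs) b memo'
                = (let q := bBest r rest (i + 1) (t + x) memo';
                   let b' : Option Int := match b with
                     | none => some q.1
                     | some bv => if q.1 < bv then some q.1 else some bv;
                   if b' = some 0 then (b', q.2)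
                   else bScan r rest (i + 1) t xs b' q.2) by rw [bScan.eq_def]]
            have hb' : (match b with
                | none => some (bBest r rest (i + 1) (t + x) memo').1
                | some bv => if (bBest r rest (i + 1) (t + x) memo').1 < bv
                    then some (bBest r rest (i + 1) (t + x) memo').1 else some bv)
                = mergeMin b (bPure r rest (t + x)) := by
              cases b with
              | none => simp [mergeMin, hq1]
              | some bv => simp [mergeMin, hq1]
            simp only [hb']
            rw [show scanRes b ((x :: xs).map (fun x => bPure r rest (t + x)))
                = (if mergeMin b (bPure r rest (t + x)) = some 0
                    then mergeMin b (bPure r rest (t + x))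
                    else scanRes (mergeMin b (bPure r rest (t + x)))
                      (xs.map (fun x => bPure r rest (t + x)))) from rfl]
            split_ifs with h0
            · exact ⟨rfl, hq2⟩
            · exact ihx (mergeMin b (bPure r rest (t + x))) _ hq2
        obtain ⟨hs1, hs2⟩ := hscan row none memo hg
        rw [show bBest r (row :: rest) i t memo
            = ((bScan r rest (i + 1) t row none memo).1.getD 0,
               PySem.Dict.insert (bScan r rest (i + 1) t row none memo).2 (i, t)
                 ((bScan r rest (i + 1) t row none memo).1.getD 0)) by rw [bBest]; simp [hc, hget]]
        have hval : (bScan r rest (i + 1) t row none memo).1.getD 0 = bPure r (row :: rest) t := by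
          rw [hs1]
          cases hrow : row with
          | nil =>
            simp only [List.map_nil, scanRes]
            rw [show bPure r ([] :: rest) t
                = (PySem.List.min? (([] : List Int).map (fun x => bPure r rest (t + x))) (fun y => y)).getD 0 by
              simp [bPure, hc]]
            rw [show PySem.List.min? (([] : List Int).map (fun x => bPure r rest (t + x))) (fun y => y) = none from
              (PySem.List.min?_eq_none_iff _ _).mpr rfl]
          | cons a as =>
            have hnn : ∀ v ∈ (as.map (fun x => bPure r rest (t + x))), (0:Int) ≤ v := by
              intro v hv
              rw [List.mem_map] at hv
              obtain ⟨x, _, rfl⟩ := hv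
              exact bPure_nonneg r rest (t + x)
            rw [show ((a :: as).map (fun x => bPure r rest (t + x)))
                = bPure r rest (t + a) :: as.map (fun x => bPure r rest (t + x)) from rfl]
            rw [show scanRes none (bPure r rest (t + a) :: as.map (fun x => bPure r rest (t + x)))
                = (if (some (bPure r rest (t + a)) : Option Int) = some 0
                    then some (bPure r rest (t + a))
                    else scanRes (some (bPure r rest (t + a))) (as.map (fun x => bPure r rest (t + x)))) from rfl]
            have hfold : scanRes (some (bPure r rest (t + a))) (as.map (fun x => bPure r rest (t + x)))
                = some ((as.map (fun x => bPure r rest (t + x))).foldl min (bPure r rest (t + a))) := by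
              rw [scanRes_eq_foldl _ _ hnn, foldl_mergeMin_min]
            have hminc := PySem.List.min?_id_cons (bPure r rest (t + a)) (as.map (fun x => bPure r rest (t + x)))
            rw [show bPure r ((a :: as) :: rest) t
                = (PySem.List.min? ((a :: as).map (fun x => bPure r rest (t + x))) (fun y => y)).getD 0 by
              simp [bPure, hc]]
            split_ifs with h0
            · rw [show ((a :: as).map (fun x => bPure r rest (t + x)))
                  = bPure r rest (t + a) :: as.map (fun x => bPure r rest (t + x)) from rfl, hminc]
              have ha0 : bPure r rest (t + a) = 0 := by
                have := congrArg (fun o => Option.getD o 1) h0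
                simpa using this
              simp only [Option.getD_some]
              have : ∀ l : List Int, (∀ v ∈ l, (0:Int) ≤ v) → l.foldl min (0:Int) = 0 := by
                intro l
                induction l with
                | nil => intro _; rfl
                | cons w l ihl =>
                  intro hl
                  have hw := hl w (List.mem_cons_self)
                  rw [List.foldl_cons, min_eq_left hw]
                  exact ihl (fun v hv => hl v (List.mem_cons_of_mem _ hv))
              rw [ha0] at *
              rw [this _ hnn]
            · rw [hfold]
              rw [show ((a :: as).map (fun x => bPure r rest (t + x)))
                  = bPure r rest (t + a) :: as.map (fun x => bPure r rest (t + x)) from rfl, hminc]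
        refine ⟨hval, ?_⟩
        intro j t' v' hget'
        rw [PySem.Dict.get?_insert] at hget'
        by_cases hjt : ((j, t') : Int × Int) = (i, t)
        · rw [if_pos hjt] at hget'
          obtain ⟨hj, ht'⟩ := Prod.ext_iff.mp hjt
          simp only at hj ht'
          subst hj
          subst ht'
          refine ⟨hi, ?_⟩
          have hvv := Option.some.inj hget'
          rw [← hvv, hval, ← hdrop]
        · rw [if_neg hjt] at hget'
          exact hs2 j t' v' hget'

-- an overshot state only gets worse: the min-abs of the evolution of a nonpositive state is its abs
theorem minAbs_cutoff {s : Int} (hs : s ≤ 0) {rs : List (List Int)}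
    (hgood : ∀ row ∈ rs, row ≠ [] ∧ (0:Int) ∈ row ∧ ∀ x ∈ row, (0:Int) ≤ x) :
    pvMinAbs (Fr [s] rs) = -s := by
  have hne : Fr [s] rs ≠ [] := Fr_ne_nil (fun r hr => (hgood r hr).1) (by simp)
  obtain ⟨⟨m, hm, hmeq⟩, hmin⟩ := pvMinAbs_spec hne
  have hle := hmin s (Fr_persist (fun r hr => (hgood r hr).2.1) (List.mem_singleton_self s))
  obtain ⟨w, hw, hmw⟩ := Fr_descend (fun r hr x hx => (hgood r hr).2.2 x hx) m hm
  rw [List.mem_singleton] at hw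
  subst hw
  rw [hmeq]
  rw [abs_of_nonpos hs] at hle
  rw [hmeq] at hle
  rw [abs_of_nonpos (by omega : m ≤ 0)] at hle ⊢
  omega

-- L1: the pure model equals the min-abs of the unpruned remainder evolution
theorem bPure_eq_Fr (r : Int) (rs : List (List Int))
    (h : ∀ row ∈ rs, row ≠ [] ∧ (0:Int) ∈ row ∧ ∀ x ∈ row, (0:Int) ≤ x) :
    ∀ t, bPure r rs t = pvMinAbs (Fr [r - t] rs) := by
  induction rs with
  | nil =>
    intro t
    by_cases hc : r ≤ t
    · rw [bPure_cutoff hc, minAbs_cutoff (by omega : r - t ≤ 0) (by simp)]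
      omega
    · show bPure r [] t = pvMinAbs [r - t]
      rw [show bPure r [] t = r - t by simp [bPure, hc]]
      obtain ⟨⟨m, hm, hmeq⟩, _⟩ := pvMinAbs_spec (show ([r - t] : List Int) ≠ [] by simp)
      rw [List.mem_singleton] at hm
      subst hm
      rw [hmeq, abs_of_pos (by omega)]
  | cons row rest ih =>
    intro t
    have hrowf := h row List.mem_cons_self
    have hrest : ∀ r' ∈ rest, r' ≠ [] ∧ (0:Int) ∈ r' ∧ ∀ x ∈ r', (0:Int) ≤ x :=
      fun r' hr' => h r' (List.mem_cons_of_mem _ hr')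
    by_cases hc : r ≤ t
    · rw [bPure_cutoff hc, minAbs_cutoff (by omega : r - t ≤ 0) h]
      omega
    · rw [show bPure r (row :: rest) t
          = (PySem.List.min? (row.map (fun x => bPure r rest (t + x))) (fun y => y)).getD 0 by
        simp [bPure, hc]]
      have hmapc : row.map (fun x => bPure r rest (t + x))
          = row.map (fun x => pvMinAbs (Fr [r - t - x] rest)) := by
        apply List.map_congr_left
        intro x _
        rw [ih hrest (t + x)]
        have : r - (t + x) = r - t - x := by ring
        rw [this]
      rw [hmapc, Fr_cons]
      have hAne : aStep [r - t] row ≠ [] := by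
        obtain ⟨x, hx⟩ := List.exists_mem_of_ne_nil row hrowf.1
        exact List.ne_nil_of_mem (mem_aStep.mpr ⟨x, hx, r - t, List.mem_singleton_self _, rfl⟩)
      have hFne : Fr (aStep [r - t] row) rest ≠ [] :=
        Fr_ne_nil (fun r' hr' => (hrest r' hr').1) hAne
      obtain ⟨⟨m, hmF, hmeq⟩, hminF⟩ := pvMinAbs_spec hFne
      have hLne : row.map (fun x => pvMinAbs (Fr [r - t - x] rest)) ≠ [] := by
        simpa using hrowf.1
      obtain ⟨hLmem, hLmin⟩ := minD_spec hLne
      apply le_antisymm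
      · obtain ⟨w, hw, hmw⟩ := Fr_src hmF
        rw [mem_aStep] at hw
        obtain ⟨x, hx, s', hs', rfl⟩ := hw
        rw [List.mem_singleton] at hs'
        subst hs'
        have hsubne : Fr [r - t - x] rest ≠ [] :=
          Fr_ne_nil (fun r' hr' => (hrest r' hr').1) (by simp)
        have h1 : pvMinAbs (Fr [r - t - x] rest) ≤ |m| := (pvMinAbs_spec hsubne).2 m hmw
        have h2 := hLmin (pvMinAbs (Fr [r - t - x] rest)) (List.mem_map.mpr ⟨x, hx, rfl⟩)
        rw [hmeq]
        omega
      · rw [List.mem_map] at hLmem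
        obtain ⟨x0, hx0, hval⟩ := hLmem
        have hsubne : Fr [r - t - x0] rest ≠ [] :=
          Fr_ne_nil (fun r' hr' => (hrest r' hr').1) (by simp)
        obtain ⟨⟨m1, hm1, hm1eq⟩, _⟩ := pvMinAbs_spec hsubne
        have hsub : ∀ z ∈ ([r - t - x0] : List Int), z ∈ aStep [r - t] row := by
          intro z hz
          rw [List.mem_singleton] at hz
          subst hz
          exact mem_aStep.mpr ⟨x0, hx0, r - t, List.mem_singleton_self _, rfl⟩
        have hm1' : m1 ∈ Fr (aStep [r - t] row) rest := Fr_mono rest hsub m1 hm1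
        have := hminF m1 hm1'
        rw [← hval, hm1eq]
        exact this

-- per-row facts about A's/B's normalisation
def pvMinE (row : List Int) : Int := (PySem.List.min? row (fun x => x)).getD 0
def pvMaxE (row : List Int) : Int := (PySem.List.max? row (fun x => x)).getD 0
def pvNorm (row : List Int) : List Int := row.map (fun num => num - pvMinE row)

theorem pvPrep_eq (mat : List (List Int)) :
    pvPrep mat = ((mat.map pvMinE).sum, (mat.map pvMaxE).sum, mat.map pvNorm) := by
  suffices h : ∀ (ms : List (List Int)) (a b : Int) (l : List (List Int)),
      ms.foldl (fun acc row =>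
        let minimum := (PySem.List.min? row (fun x => x)).getD 0
        let maximum := (PySem.List.max? row (fun x => x)).getD 0
        (acc.1 + minimum, acc.2.1 + maximum,
          acc.2.2 ++ [row.map (fun num => num - minimum)])) (a, b, l)
        = (a + (ms.map pvMinE).sum, b + (ms.map pvMaxE).sum, l ++ ms.map pvNorm) by
    have := h mat 0 0 []
    simpa [pvPrep] using this
  intro ms
  induction ms with
  | nil => intro a b l; simp
  | cons row rest ih =>
    intro a b l
    simp only [List.foldl_cons, List.map_cons, List.sum_cons]
    rw [ih]
    refine congrArg₂ _ (by rw [pvMinE]; ring) (congrArg₂ _ (by rw [pvMaxE]; ring) ?_)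
    simp [pvNorm, pvMinE]

theorem bPrep_eq (mat : List (List Int)) :
    bPrep mat = ((mat.map pvMinE).sum, mat.map pvNorm) := by
  suffices h : ∀ (ms : List (List Int)) (a : Int) (l : List (List Int)),
      ms.foldl (fun acc row =>
        let minimum := (PySem.List.min? row (fun x => x)).getD 0
        (acc.1 + minimum, acc.2 ++ [row.map (fun num => num - minimum)])) (a, l)
        = (a + (ms.map pvMinE).sum, l ++ ms.map pvNorm) by
    have := h mat 0 []
    simpa [bPrep] using this
  intro ms
  induction ms with
  | nil => intro a l; simp
  | cons row rest ih =>
    intro a l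
    simp only [List.foldl_cons, List.map_cons, List.sum_cons]
    rw [ih]
    refine congrArg₂ _ (by rw [pvMinE]; ring) ?_
    simp [pvNorm, pvMinE]

theorem pvNorm_facts {row : List Int} (h : row ≠ []) :
    pvNorm row ≠ [] ∧ (0:Int) ∈ pvNorm row ∧ (∀ x ∈ pvNorm row, (0:Int) ≤ x) ∧
      (pvMaxE row - pvMinE row) ∈ pvNorm row ∧
      (∀ x ∈ pvNorm row, x ≤ pvMaxE row - pvMinE row) := by
  obtain ⟨mn, hmn⟩ : ∃ mn, PySem.List.min? row (fun x => x) = some mn := by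
    cases heq : PySem.List.min? row (fun x => x) with
    | none => exact absurd ((PySem.List.min?_eq_none_iff _ _).mp heq) h
    | some mn => exact ⟨mn, rfl⟩
  obtain ⟨mx, hmx⟩ : ∃ mx, PySem.List.max? row (fun x => x) = some mx := by
    cases heq : PySem.List.max? row (fun x => x) with
    | none => exact absurd ((PySem.List.max?_eq_none_iff _ _).mp heq) h
    | some mx => exact ⟨mx, rfl⟩
  have hmnm := PySem.List.min?_mem hmn
  have hmnle := PySem.List.min?_isMin hmn
  have hmxm := PySem.List.max?_mem hmx
  have hmxge := PySem.List.max?_isMax hmx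
  have hE : pvMinE row = mn := by simp [pvMinE, hmn]
  have hEx : pvMaxE row = mx := by simp [pvMaxE, hmx]
  refine ⟨by simp [pvNorm, h], ?_, ?_, ?_, ?_⟩
  · rw [pvNorm]
    exact List.mem_map.mpr ⟨mn, hmnm, by rw [hE]; ring⟩
  · intro x hx
    rw [pvNorm, List.mem_map] at hx
    obtain ⟨a, ha, rfl⟩ := hx
    have := hmnle a ha
    rw [hE]; omega
  · rw [pvNorm]
    exact List.mem_map.mpr ⟨mx, hmxm, by rw [hE, hEx]⟩
  · intro x hx
    rw [pvNorm, List.mem_map] at hx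
    obtain ⟨a, ha, rfl⟩ := hx
    have := hmxge a ha
    rw [hE, hEx]; omega

-- picking the per-row maximum in every row: r - diff_max_min is an unpruned remainder state
theorem Fr_pick {mat : List (List Int)} (h : ∀ row ∈ mat, row ≠ []) :
    ∀ (S : List Int) (s : Int), s ∈ S →
      s - ((mat.map pvMaxE).sum - (mat.map pvMinE).sum) ∈ Fr S (mat.map pvNorm) := by
  induction mat with
  | nil => intro S s hs; simpa using hs
  | cons row rest ih =>
    intro S s hs
    have hrne := h row List.mem_cons_self
    have hrest : ∀ r ∈ rest, r ≠ [] := fun r hr => h r (List.mem_cons_of_mem _ hr)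
    simp only [List.map_cons, List.sum_cons]
    rw [Fr_cons]
    have hmem : s - (pvMaxE row - pvMinE row) ∈ aStep S (pvNorm row) :=
      mem_aStep.mpr ⟨pvMaxE row - pvMinE row, (pvNorm_facts hrne).2.2.2.1, s, hs, rfl⟩
    have := ih hrest _ _ hmem
    have harith : s - (pvMaxE row - pvMinE row) - ((rest.map pvMaxE).sum - (rest.map pvMinE).sum)
        = s - (pvMaxE row + (rest.map pvMaxE).sum - (pvMinE row + (rest.map pvMinE).sum)) := by ring
    rwa [harith] at this

-- no remainder state drops below r - diff_max_min
theorem Fr_ge {mat : List (List Int)} (h : ∀ row ∈ mat, row ≠ []) :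
    ∀ (S : List Int), ∀ u ∈ Fr S (mat.map pvNorm),
      ∃ w ∈ S, w - ((mat.map pvMaxE).sum - (mat.map pvMinE).sum) ≤ u := by
  induction mat with
  | nil => intro S u hu; exact ⟨u, by simpa using hu, by simp⟩
  | cons row rest ih =>
    intro S u hu
    have hrne := h row List.mem_cons_self
    have hrest : ∀ r ∈ rest, r ≠ [] := fun r hr => h r (List.mem_cons_of_mem _ hr)
    simp only [List.map_cons] at hu
    rw [Fr_cons] at hu
    obtain ⟨w', hw', hle⟩ := ih hrest _ u hu
    rw [mem_aStep] at hw'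
    obtain ⟨x, hx, w, hw, rfl⟩ := hw'
    have hxb := (pvNorm_facts hrne).2.2.2.2 x hx
    refine ⟨w, hw, ?_⟩
    simp only [List.map_cons, List.sum_cons]
    omega

-- pointwise same-membership rows lists generate the same remainder states
theorem Fr_rows_congr {rows1 rows2 : List (List Int)}
    (hc : List.Forall₂ (fun r1 r2 => ∀ x : Int, x ∈ r1 ↔ x ∈ r2) rows1 rows2) :
    ∀ (S : List Int) (y : Int), y ∈ Fr S rows1 ↔ y ∈ Fr S rows2 := by
  induction hc with
  | nil => intro S y; rfl
  | @cons r1 r2 t1 t2 hr _ ih =>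
    intro S y
    rw [Fr_cons, Fr_cons]
    have hsub12 : ∀ z ∈ aStep S r1, z ∈ aStep S r2 := by
      intro z hz
      rw [mem_aStep] at hz ⊢
      obtain ⟨x, hx, s, hs, rfl⟩ := hz
      exact ⟨x, (hr x).mp hx, s, hs, rfl⟩
    have hsub21 : ∀ z ∈ aStep S r2, z ∈ aStep S r1 := by
      intro z hz
      rw [mem_aStep] at hz ⊢
      obtain ⟨x, hx, s, hs, rfl⟩ := hz
      exact ⟨x, (hr x).mpr hx, s, hs, rfl⟩
    constructor
    · intro hy
      exact (ih (aStep S r2) y).mp (Fr_mono t1 hsub12 y hy)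
    · intro hy
      exact Fr_mono t1 hsub21 y ((ih (aStep S r2) y).mpr hy)

-- B's per-row choice lists (sorted(set(row), reverse=True)) have the same members as the rows
theorem sorted_map_congr (rs : List (List Int)) :
    List.Forall₂ (fun r1 r2 => ∀ x : Int, x ∈ r1 ↔ x ∈ r2)
      (rs.map (fun row => PySem.List.sorted (PySem.Set.ofList row) (fun x => x) true)) rs := by
  induction rs with
  | nil => exact List.Forall₂.nil
  | cons row rest ih =>
    exact List.Forall₂.cons
      (fun x => by rw [PySem.List.mem_sorted, PySem.Set.mem_ofList]) ih

-- ===== VERDICT (by name: the statement is the Claim_ definition above) =====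
theorem minimizeTheDifference_spec : Claim_equal_minimizeTheDifference := by
  intro mat target _dom pre
  unfold Spec_minimizeTheDifference
  simp only [minimizeTheDifference, minimizeTheDifference_alt, pvPrep_eq, bPrep_eq]
  set Smn := (mat.map pvMinE).sum with hSmn
  set Smx := (mat.map pvMaxE).sum with hSmx
  set rows := mat.map pvNorm with hrows
  set r := target - Smn with hr
  set d := Smx - Smn with hd
  set choices := rows.map (fun row => PySem.List.sorted (PySem.Set.ofList row) (fun x => x) true) with hch
  have rowsGood : ∀ row ∈ rows, row ≠ [] ∧ (0:Int) ∈ row ∧ ∀ x ∈ row, (0:Int) ≤ x := by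
    intro row hrow
    rw [hrows, List.mem_map] at hrow
    obtain ⟨orig, ho, rfl⟩ := hrow
    obtain ⟨a, b, c, _⟩ := pvNorm_facts (pre orig ho)
    exact ⟨a, b, c⟩
  have chGood : ∀ row ∈ choices, row ≠ [] ∧ (0:Int) ∈ row ∧ ∀ x ∈ row, (0:Int) ≤ x := by
    intro row hrow
    rw [hch, List.mem_map] at hrow
    obtain ⟨orig, ho, rfl⟩ := hrow
    obtain ⟨hne, h0, hnn⟩ := rowsGood orig ho
    have hmem : ∀ x : Int, x ∈ PySem.List.sorted (PySem.Set.ofList orig) (fun x => x) true ↔ x ∈ orig := by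
      intro x
      rw [PySem.List.mem_sorted, PySem.Set.mem_ofList]
    exact ⟨List.ne_nil_of_mem ((hmem 0).mpr h0), (hmem 0).mpr h0,
      fun x hx => hnn x ((hmem x).mp hx)⟩
  have hchcongr : List.Forall₂ (fun r1 r2 => ∀ x : Int, x ∈ r1 ↔ x ∈ r2) choices rows := by
    rw [hch]
    exact sorted_map_congr rows
  have hBgood : GoodMemo r choices (PySem.Dict.empty) := by
    intro j t v hget
    rw [PySem.Dict.get?_empty] at hget
    cases hget
  have hB : (bBest r choices 0 0 (PySem.Dict.empty)).1 = bPure r choices 0 :=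
    (bBest_eq r choices choices 0 0 _ (le_refl 0) (by simp) hBgood).1
  rw [hB]
  have hchne : ∀ row ∈ choices, row ≠ [] := fun row h' => (chGood row h').1
  have hrowne : ∀ row ∈ rows, row ≠ [] := fun row h' => (rowsGood row h').1
  have hFneC : Fr [r] choices ≠ [] := Fr_ne_nil hchne (by simp)
  have hFneR : Fr [r] rows ≠ [] := Fr_ne_nil hrowne (by simp)
  have hCR : pvMinAbs (Fr [r] choices) = pvMinAbs (Fr [r] rows) :=
    pvMinAbs_congr hFneC hFneR (Fr_rows_congr hchcongr [r])
  have hpick : r - d ∈ Fr [r] rows := by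
    have hp := Fr_pick pre [r] r (List.mem_singleton_self r)
    rw [← hSmx, ← hSmn, ← hrows, ← hd] at hp
    exact hp
  split_ifs with hneg hbig
  · rw [bPure_cutoff hneg, abs_of_nonpos hneg]
    omega
  · rw [bPure_eq_Fr r choices chGood 0, show r - (0:Int) = r by ring, hCR]
    push Not at hneg
    obtain ⟨⟨m, hm, hmeq⟩, hmin⟩ := pvMinAbs_spec hFneR
    have hub := hmin (r - d) hpick
    have hm' : m ∈ Fr [r] (mat.map pvNorm) := by rw [← hrows]; exact hm
    obtain ⟨w, hw, hlb⟩ := Fr_ge pre [r] m hm'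
    rw [List.mem_singleton] at hw
    subst hw
    rw [← hSmx, ← hSmn, ← hd] at hlb
    rw [abs_of_nonneg (by omega : (0:Int) ≤ r - d)] at hub
    have hmabs := le_abs_self m
    rw [hmeq] at hub ⊢
    omega
  · push Not at hneg hbig
    have hrmem : r ∈ PySem.Set.ofList [r] := by
      rw [PySem.Set.mem_ofList]
      exact List.mem_singleton_self r
    have hans0 : ∀ s ∈ PySem.Set.ofList [r], min |r| |r - d| ≤ |s| := by
      intro s hs
      rw [PySem.Set.mem_ofList, List.mem_singleton] at hs
      rw [hs]
      exact min_le_left _ _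
    have hkey := aLoop_eq rows (PySem.Set.ofList [r]) (min |r| |r - d|) rowsGood
      ⟨r, hrmem, by omega⟩ hans0 (le_min (abs_nonneg _) (abs_nonneg _))
    rw [hkey]
    have hFne1 : Fr (PySem.Set.ofList [r]) rows ≠ [] := Fr_ne_nil hrowne (List.ne_nil_of_mem hrmem)
    have hmemFr : ∀ y, y ∈ Fr (PySem.Set.ofList [r]) rows ↔ y ∈ Fr [r] rows := by
      intro y
      constructor
      · exact fun hy => Fr_mono rows (fun z hz => by rwa [PySem.Set.mem_ofList] at hz) y hy
      · exact fun hy => Fr_mono rows (fun z hz => by rwa [PySem.Set.mem_ofList]) y hy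
    have hcongr1 : pvMinAbs (Fr (PySem.Set.ofList [r]) rows) = pvMinAbs (Fr [r] rows) :=
      pvMinAbs_congr hFne1 hFneR hmemFr
    obtain ⟨⟨m, hm, hmeq⟩, hmin⟩ := pvMinAbs_spec hFneR
    have h1 : pvMinAbs (Fr [r] rows) ≤ |r| :=
      hmin r (Fr_persist (fun row hrw => (rowsGood row hrw).2.1) (List.mem_singleton_self r))
    have h2 : pvMinAbs (Fr [r] rows) ≤ |r - d| := hmin (r - d) hpick
    rw [hcongr1, min_eq_right (le_min h1 h2)]
    rw [bPure_eq_Fr r choices chGood 0, show r - (0:Int) = r by ring]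
    exact (pvMinAbs_congr hFneC hFneR (Fr_rows_congr hchcongr [r])).symm
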